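-- pv_equiv track=rewrite | github.com/kuprogrammingclub/Weekly-Problems-2012-2015 | Week 17/Advanced/ryanscott.py | find_close_matches
-- ===== SOURCE A (Python) =====
-- def find_close_matches(dictionary):
-- 	matches = {}
-- 	for word in dictionary:
-- 		for i in range(len(word)):
-- 			pattern = word[:i] + '_' + word[i+1:]
-- 			if pattern in matches:
-- 				matches[pattern] += [word]
-- 			else:
-- 				matches[pattern] = [word]
-- 	return matches
-- ===== SOURCE B (Python) =====
-- def find_close_matches(dictionary):
--     # Two-phase: flatten all (pattern, word) pairs, then group by first-seen pattern.
--     pairs = [(word[:i] + '_' + word[i+1:], word)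
--              for word in dictionary for i in range(len(word))]
--     result = {}
--     for p in dict.fromkeys(p for p, _ in pairs):
--         result[p] = [w for q, w in pairs if q == p]
--     return result
-- ===== Notes on version B (the rewrite author's own statement) =====
-- stated objective: alternative
-- what changed: Replaces the single-pass hash accumulation with a two-phase decomposition: first flatten all (pattern, word) pairs, then group them by deduplicated pattern with a per-pattern filter pass.
import Mathlib
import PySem

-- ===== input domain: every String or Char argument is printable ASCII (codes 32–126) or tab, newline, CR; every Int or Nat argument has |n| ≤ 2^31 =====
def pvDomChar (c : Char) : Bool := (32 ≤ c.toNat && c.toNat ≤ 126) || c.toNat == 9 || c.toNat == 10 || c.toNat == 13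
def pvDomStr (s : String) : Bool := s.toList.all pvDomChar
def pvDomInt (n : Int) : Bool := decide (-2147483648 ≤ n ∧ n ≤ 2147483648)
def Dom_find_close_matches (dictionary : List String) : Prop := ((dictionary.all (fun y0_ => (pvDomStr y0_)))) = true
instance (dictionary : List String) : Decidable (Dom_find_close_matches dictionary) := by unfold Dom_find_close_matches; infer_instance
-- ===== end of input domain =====

-- B replaces A's single-pass dict accumulation by a two-phase pass: flatten all (pattern, word)
-- pairs, then group by deduplicated pattern with a per-pattern filter (alternative decomposition,
-- same return value).

-- ===== PORT A =====
-- word[:i] + '_' + word[i+1:]  (shared by both ports; built on PySem slices over the char list)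
def pvPattern (word : String) (i : Int) : String :=
  String.ofList (PySem.List.slice word.toList none (some i) ++ ['_'] ++
             PySem.List.slice word.toList (some (i + 1)) none)

def find_close_matches (dictionary : List String) : List (String × List String) :=
  (dictionary.foldl (fun acc_d word =>
      (PySem.List.pyRange 0 (PySem.Str.len word) 1).foldl (fun acc_d i =>
        let pattern := pvPattern word i
        if acc_d.contains pattern then
          acc_d.insert pattern (acc_d.getD pattern [] ++ [word])
        else
          acc_d.insert pattern [word]) acc_d)
    PySem.Dict.empty).items

-- ===== PORT B =====
def find_close_matches_alt (dictionary : List String) : List (String × List String) :=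
  let pairs := dictionary.flatMap (fun word =>
      (PySem.List.pyRange 0 (PySem.Str.len word) 1).map (fun i => (pvPattern word i, word)))
  ((PySem.List.dedup (pairs.map (fun q => q.1))).foldl
      (fun result p =>
        result.insert p ((pairs.filter (fun q => q.1 == p)).map (fun q => q.2)))
      PySem.Dict.empty).items

-- ===== PRECONDITION & SPEC =====
def Spec_find_close_matches (dictionary : List String) (out : List (String × List String)) : Prop := out = find_close_matches_alt dictionary
instance (dictionary : List String) (out : List (String × List String)) : Decidable (Spec_find_close_matches dictionary out) := by unfold Spec_find_close_matches; infer_instance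

-- ===== CLAIM (what is proved, stated in full; the proofs are below) =====
def Claim_equal_find_close_matches : Prop := ∀ (dictionary : List String), Dom_find_close_matches dictionary → Spec_find_close_matches dictionary (find_close_matches dictionary)

-- ===== LEMMAS AND PROOFS =====

-- a foldl over a flatMap is the nested fold
theorem pv_foldl_flatMap {α β γ : Type} (g : α → List β) (f : γ → β → γ) (l : List α) (init : γ) :
    (l.flatMap g).foldl f init = l.foldl (fun acc x => (g x).foldl f acc) init := by
  induction l generalizing init with
  | nil => rfl
  | cons a t ih => simp [List.flatMap_cons, List.foldl_append, ih]

-- a dict with nodup keys is its keys paired with their values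
theorem pv_items_eq_keys_map {κ ν : Type} [BEq κ] [LawfulBEq κ]
    (d : PySem.Dict κ ν) (dflt : ν) (h : d.keys.Nodup) :
    d.items = d.keys.map (fun k => (k, d.getD k dflt)) := by
  have h1 : d.items.map (fun p => (p.1, d.getD p.1 dflt)) = d.items := by
    have := List.map_congr_left (l := d.items) (g := id)
      (f := fun p => (p.1, d.getD p.1 dflt)) ?_
    · simpa using this
    · intro p hp
      obtain ⟨a, b⟩ := p
      have := PySem.Dict.getD_of_mem_items d hp h dflt
      simp [this]
  calc d.items = d.items.map (fun p => (p.1, d.getD p.1 dflt)) := h1.symm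
    _ = (d.items.map (fun p => p.1)).map (fun k => (k, d.getD k dflt)) := by
          rw [List.map_map]; rfl
    _ = d.keys.map (fun k => (k, d.getD k dflt)) := rfl

-- ===== VERDICT (by name: the statement is the Claim_ definition above) =====
theorem find_close_matches_spec : Claim_equal_find_close_matches := by
  intro dictionary _
  unfold Spec_find_close_matches find_close_matches find_close_matches_alt
  set pairs : List (String × String) := dictionary.flatMap (fun word =>
      (PySem.List.pyRange 0 (PySem.Str.len word) 1).map (fun i => (pvPattern word i, word)))
    with hpairs
  -- A's nested loop is the fold of its step over the flat pair list
  have hA : (dictionary.foldl (fun acc_d word =>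
      (PySem.List.pyRange 0 (PySem.Str.len word) 1).foldl (fun acc_d i =>
        let pattern := pvPattern word i
        if acc_d.contains pattern then
          acc_d.insert pattern (acc_d.getD pattern [] ++ [word])
        else
          acc_d.insert pattern [word]) acc_d)
    PySem.Dict.empty) =
      pairs.foldl (fun d q => d.modify q.1 [] (· ++ [q.2])) PySem.Dict.empty := by
    rw [hpairs, pv_foldl_flatMap]
    apply PySem.List.foldl_congr_mem
    intro acc word _
    rw [List.foldl_map]
    apply PySem.List.foldl_congr_mem
    intro d i _
    show (if d.contains (pvPattern word i) then
            d.insert (pvPattern word i) (d.getD (pvPattern word i) [] ++ [word])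
          else d.insert (pvPattern word i) [word]) =
         d.modify (pvPattern word i) [] (· ++ [word])
    by_cases h : d.contains (pvPattern word i)
    · simp [h, PySem.Dict.modify]
    · rw [PySem.Dict.modify, PySem.Dict.getD_of_not_contains _ _ (by simpa using h)]
      simp [h]
  rw [hA]
  set dA : PySem.Dict String (List String) :=
    pairs.foldl (fun d q => d.modify q.1 [] (· ++ [q.2])) PySem.Dict.empty with hdA
  -- A's dict: keys, nodup, values
  have hkeys : dA.keys = PySem.List.dedup (pairs.map (fun q => q.1)) := by
    rw [hdA]
    rw [PySem.Dict.keys_foldl_modify_key (key := fun q : String × String => q.1)]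
    rw [PySem.Dict.keys_empty, PySem.Set.update_nil_left]
    simp
  have hnodup : dA.keys.Nodup := by
    rw [hkeys]; exact PySem.List.nodup_dedup _
  have hvals : ∀ p, dA.getD p [] = (pairs.filter (fun q => q.1 == p)).map (fun q => q.2) := by
    intro p
    rw [hdA, PySem.Dict.getD_foldl_modify_append]
    simp
  -- B's dict: a fold of inserts over fresh distinct keys
  have hB : ((PySem.List.dedup (pairs.map (fun q => q.1))).foldl
      (fun result p =>
        result.insert p ((pairs.filter (fun q => q.1 == p)).map (fun q => q.2)))
      PySem.Dict.empty).items =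
      (PySem.List.dedup (pairs.map (fun q => q.1))).map
        (fun p => (p, (pairs.filter (fun q => q.1 == p)).map (fun q => q.2))) := by
    rw [PySem.Dict.items_foldl_insert_fresh
      (PySem.List.dedup (pairs.map (fun q => q.1)))
      (fun p : String => p)
      (fun p => (pairs.filter (fun q => q.1 == p)).map (fun q => q.2))
      PySem.Dict.empty
      (fun a _ => PySem.Dict.contains_empty a)
      (by simp)]
    simp [PySem.Dict.empty]
  rw [hB, pv_items_eq_keys_map dA [] hnodup, hkeys]
  apply List.map_congr_left
  intro p _
  rw [hvals]
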